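-- pv_equiv track=rewrite | github.com/mattrodgers31/aoc2022 | d15/d15.py | check_rectangle
-- ===== SOURCE A (Python) =====
-- def manhattan_distance(a, b):
--     return abs(a[0] - b[0]) + abs(a[1] - b[1])
--
-- def check_rectangle(rectangle, sl):
--     x0, x1, y0, y1 = rectangle
--     corners = [(x0, y0), (x0, y1), (x1, y0), (x1, y1)]
--     for s, d in sl:
--         covered = True
--         for c in corners:
--             if manhattan_distance(s, c) > d:
--                 covered = False
--                 break
--         if covered:
--             return True
--     return False
-- ===== SOURCE B (Python) =====
-- def check_rectangle(rectangle, sl):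
--     x0, x1, y0, y1 = rectangle
--     return any(
--         max(abs(sx - x0), abs(sx - x1)) + max(abs(sy - y0), abs(sy - y1)) <= d
--         for (sx, sy), d in sl
--     )
-- ===== Notes on version B (the rewrite author's own statement) =====
-- stated objective: simpler
-- what changed: The four-corner list and the inner break loop are replaced by a closed-form worst-corner distance max(|sx-x0|,|sx-x1|)+max(|sy-y0|,|sy-y1|) <= d per sensor, using separability of Manhattan distance over the corner product set.
import Mathlib
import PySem

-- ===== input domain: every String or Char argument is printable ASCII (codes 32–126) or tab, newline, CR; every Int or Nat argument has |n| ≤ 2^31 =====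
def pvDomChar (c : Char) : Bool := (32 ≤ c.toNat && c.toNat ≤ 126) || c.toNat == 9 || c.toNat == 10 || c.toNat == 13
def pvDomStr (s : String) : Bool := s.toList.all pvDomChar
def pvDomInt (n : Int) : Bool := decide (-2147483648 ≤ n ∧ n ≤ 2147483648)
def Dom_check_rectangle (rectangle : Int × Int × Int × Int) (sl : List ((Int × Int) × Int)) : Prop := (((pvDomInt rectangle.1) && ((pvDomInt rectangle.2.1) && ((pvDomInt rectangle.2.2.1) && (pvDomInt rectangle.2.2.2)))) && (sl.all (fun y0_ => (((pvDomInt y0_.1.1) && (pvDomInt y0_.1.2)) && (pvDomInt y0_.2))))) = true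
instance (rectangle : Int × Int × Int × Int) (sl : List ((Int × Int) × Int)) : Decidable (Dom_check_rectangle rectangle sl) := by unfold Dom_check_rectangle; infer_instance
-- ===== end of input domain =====

-- ===== PORT A =====
-- B replaces the four-corner list and inner break loop by a closed-form worst-corner
-- distance per sensor; return value equivalence, both programs are total.
def manhattan_distance (a b : Int × Int) : Int := |a.1 - b.1| + |a.2 - b.2|

-- inner 'for c in corners' loop with its break (covered flag)
def coveredLoop (s : Int × Int) (d : Int) : List (Int × Int) → Bool
  | [] => true
  | c :: rest => if manhattan_distance s c > d then false else coveredLoop s d rest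

-- outer 'for s, d in sl' loop with its early return
def outerLoop (corners : List (Int × Int)) : List ((Int × Int) × Int) → Bool
  | [] => false
  | (s, d) :: rest => if coveredLoop s d corners then true else outerLoop corners rest

def check_rectangle (rectangle : Int × Int × Int × Int) (sl : List ((Int × Int) × Int)) : Bool :=
  match rectangle with
  | (x0, x1, y0, y1) =>
    outerLoop [(x0, y0), (x0, y1), (x1, y0), (x1, y1)] sl

-- ===== PORT B =====
def check_rectangle_alt (rectangle : Int × Int × Int × Int) (sl : List ((Int × Int) × Int)) : Bool :=
  match rectangle with
  | (x0, x1, y0, y1) =>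
    sl.any (fun sd =>
      max |sd.1.1 - x0| |sd.1.1 - x1| + max |sd.1.2 - y0| |sd.1.2 - y1| ≤ sd.2)

-- ===== PRECONDITION & SPEC =====
def Spec_check_rectangle (rectangle : Int × Int × Int × Int) (sl : List ((Int × Int) × Int)) (out : Bool) : Prop := out = check_rectangle_alt rectangle sl
instance (rectangle : Int × Int × Int × Int) (sl : List ((Int × Int) × Int)) (out : Bool) : Decidable (Spec_check_rectangle rectangle sl out) := by unfold Spec_check_rectangle; infer_instance

-- ===== CLAIM (what is proved, stated in full; the proofs are below) =====
def Claim_equal_check_rectangle : Prop := ∀ (rectangle : Int × Int × Int × Int) (sl : List ((Int × Int) × Int)), Dom_check_rectangle rectangle sl → Spec_check_rectangle rectangle sl (check_rectangle rectangle sl)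

-- ===== LEMMAS AND PROOFS =====

-- ===== VERDICT (by name: the statement is the Claim_ definition above) =====
-- the inner corner loop equals the closed-form worst-corner test
theorem coveredLoop_eq (x0 x1 y0 y1 sx sy d : Int) :
    coveredLoop (sx, sy) d [(x0, y0), (x0, y1), (x1, y0), (x1, y1)] =
      decide (max |sx - x0| |sx - x1| + max |sy - y0| |sy - y1| ≤ d) := by
  simp only [coveredLoop, manhattan_distance]
  rcases abs_cases (sx - x0) with ⟨h1, _⟩ | ⟨h1, _⟩ <;>
  rcases abs_cases (sx - x1) with ⟨h2, _⟩ | ⟨h2, _⟩ <;>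
  rcases abs_cases (sy - y0) with ⟨h3, _⟩ | ⟨h3, _⟩ <;>
  rcases abs_cases (sy - y1) with ⟨h4, _⟩ | ⟨h4, _⟩ <;>
  rw [h1, h2, h3, h4] <;>
  split_ifs <;> simp <;> omega

theorem check_rectangle_eq (rectangle : Int × Int × Int × Int)
    (sl : List ((Int × Int) × Int)) :
    check_rectangle rectangle sl = check_rectangle_alt rectangle sl := by
  obtain ⟨x0, x1, y0, y1⟩ := rectangle
  unfold check_rectangle check_rectangle_alt
  induction sl with
  | nil => rfl
  | cons hd tl ih =>
    obtain ⟨⟨sx, sy⟩, d⟩ := hd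
    simp only [outerLoop, List.any_cons, coveredLoop_eq]
    by_cases h : max |sx - x0| |sx - x1| + max |sy - y0| |sy - y1| ≤ d <;> simp [h, ih]

theorem check_rectangle_spec : Claim_equal_check_rectangle :=
  fun rectangle sl _ => check_rectangle_eq rectangle sl
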